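-- pv_equiv track=rewrite | github.com/PavelAmelin/python_seminars | python_seminar_5/base_task_5.py | as_code
-- ===== SOURCE A (Python) =====
-- def as_code(n=32):
--     res = ''
--     if n == 127:
--         res += f'{n} - {chr(n)}'
--     else:
--         if n in (42, 52, 62, 72, 82, 92, 102, 112, 122):
--             res += '\n'
--         res += ' ' + f'{n} - {chr(n) + as_code(n + 1)}'
--     return res
-- ===== SOURCE B (Python) =====
-- def as_code(n=32):
--     parts = []
--     m = n
--     while m != 127:
--         if m in (42, 52, 62, 72, 82, 92, 102, 112, 122):
--             parts.append('\n')
--         parts.append(f' {m} - {chr(m)}')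
--         m += 1
--     parts.append(f'127 - {chr(127)}')
--     return ''.join(parts)
-- ===== Notes on version B (the rewrite author's own statement) =====
-- stated objective: idiomatic
-- what changed: Replaces the linear tail recursion (one string concatenation per stack frame) by a single iterative while-loop that appends pieces to a list and joins once at the end.
import Mathlib
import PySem

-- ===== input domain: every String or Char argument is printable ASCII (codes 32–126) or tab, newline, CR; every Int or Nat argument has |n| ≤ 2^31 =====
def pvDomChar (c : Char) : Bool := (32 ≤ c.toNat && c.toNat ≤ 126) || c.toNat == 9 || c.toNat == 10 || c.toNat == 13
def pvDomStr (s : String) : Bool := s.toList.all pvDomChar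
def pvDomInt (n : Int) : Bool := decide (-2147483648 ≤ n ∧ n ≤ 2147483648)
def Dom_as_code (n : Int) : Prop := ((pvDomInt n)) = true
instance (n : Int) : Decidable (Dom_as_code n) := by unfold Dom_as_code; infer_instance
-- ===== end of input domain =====

-- B replaces A's linear tail recursion by an iterative loop collecting pieces in a list joined once (idiomatic; return value only, no side effects).

-- ===== PORT A =====
-- chr(n) on the admitted domain 0 ≤ n ≤ 127 (exact there)
def pvChr (n : Int) : String := String.ofList [Char.ofNat n.toNat]

-- literal transliteration of A; the `n > 127` guard only makes the recursion
-- total (Python A raises RecursionError there; Pre_ excludes it)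
def as_code (n : Int) : String :=
  if n = 127 then
    "" ++ (PySem.Int.toStr n ++ " - " ++ pvChr n)
  else if 127 < n then ""   -- totality guard, outside Pre_as_code
  else
    ("" ++ (if n ∈ ([42, 52, 62, 72, 82, 92, 102, 112, 122] : List Int) then "\n" else ""))
      ++ (" " ++ (PySem.Int.toStr n ++ " - " ++ (pvChr n ++ as_code (n + 1))))
termination_by (128 - n).toNat
decreasing_by omega

-- ===== PORT B =====
-- the while-loop of Source B: appends pieces to `parts`, stops at m = 127
-- (same totality guard `127 < m` for the inputs Pre_ excludes)
def asCodeLoop (m : Int) (parts : List String) : List String :=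
  if m = 127 then parts
  else if 127 < m then parts   -- totality guard, outside Pre_as_code
  else
    asCodeLoop (m + 1)
      (parts
        ++ (if m ∈ ([42, 52, 62, 72, 82, 92, 102, 112, 122] : List Int) then ["\n"] else [])
        ++ [" " ++ PySem.Int.toStr m ++ " - " ++ pvChr m])
termination_by (128 - m).toNat
decreasing_by omega

def as_code_alt (n : Int) : String :=
  String.join (asCodeLoop n [] ++ ["127 - " ++ pvChr 127])

-- ===== PRECONDITION & SPEC =====
-- Pre_ excludes n < 0 (chr raises ValueError) and n > 127 (A raises RecursionError, B's loop never ends)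
def Pre_as_code (n : Int) : Prop := 0 ≤ n ∧ n ≤ 127
instance (n : Int) : Decidable (Pre_as_code n) := by unfold Pre_as_code; infer_instance
def pvWitness_as_code : Int := (32)

def Spec_as_code (n : Int) (out : String) : Prop := out = as_code_alt n
instance (n : Int) (out : String) : Decidable (Spec_as_code n out) := by unfold Spec_as_code; infer_instance

-- ===== CLAIM (what is proved, stated in full; the proofs are below) =====
def Claim_equal_as_code : Prop := ∀ (n : Int), Dom_as_code n → Pre_as_code n → Spec_as_code n (as_code n)

-- ===== LEMMAS AND PROOFS =====

lemma foldl_str_append (xs : List String) : ∀ (a : String),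
    List.foldl (fun r s => r ++ s) a xs = a ++ String.join xs := by
  induction xs with
  | nil => intro a; simp [String.join]
  | cons h t ih =>
    intro a
    simp only [List.foldl, String.join] at *
    rw [ih (a ++ h), ih ("" ++ h)]
    simp [String.append_assoc]

lemma join_append (xs ys : List String) :
    String.join (xs ++ ys) = String.join xs ++ String.join ys := by
  simp only [String.join, List.foldl_append]
  rw [foldl_str_append ys (List.foldl (fun r s => r ++ s) "" xs)]
  rfl

lemma key (k : Nat) : ∀ (n : Int) (parts : List String), 0 ≤ n → n + k = 127 →
    String.join (asCodeLoop n parts ++ ["127 - " ++ pvChr 127]) =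
      String.join parts ++ as_code n := by
  induction k with
  | zero =>
    intro n parts _ h
    have hn : n = 127 := by omega
    subst hn
    rw [asCodeLoop, if_pos rfl]
    conv_rhs => rw [as_code, if_pos rfl]
    rw [join_append]
    simp [String.join]
    decide
  | succ k ih =>
    intro n parts hn h
    have h1 : n ≠ 127 := by omega
    have h2 : ¬ 127 < n := by omega
    rw [asCodeLoop, if_neg h1, if_neg h2,
        ih (n + 1) _ (by omega) (by omega)]
    conv_rhs => rw [as_code, if_neg h1, if_neg h2]
    by_cases hm : n ∈ ([42, 52, 62, 72, 82, 92, 102, 112, 122] : List Int) <;>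
      simp [hm, String.join, String.append_assoc]

-- ===== VERDICT (by name: the statement is the Claim_ definition above) =====
theorem as_code_spec : Claim_equal_as_code := by
  intro n _ hpre
  obtain ⟨h0, h1⟩ := hpre
  unfold Spec_as_code as_code_alt
  rw [key (127 - n).toNat n [] h0 (by omega)]
  simp [String.join]
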